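-- pv_equiv track=rewrite | github.com/jackytck/checkio | LetterQueue.py | letter_queue
-- ===== SOURCE A (Python) =====
-- def letter_queue(commands):
--     q = []
--     for c in commands:
--         if c == 'POP':
--             q = q[1:]
--         else:
--             q.append(c[-1])
--     return ''.join(q)
-- ===== SOURCE B (Python) =====
-- def letter_queue(commands):
--     # One pass: record every pushed char; a POP just shrinks a size counter
--     # (clamped at 0).  The surviving queue is always the last `size` pushed
--     # chars, so no front-removal is ever performed.
--     pushed = []
--     size = 0
--     for c in commands:
--         if c == 'POP':
--             size = max(size - 1, 0)
--         else:
--             pushed.append(c[-1])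
--             size += 1
--     return ''.join(pushed[len(pushed) - size:])
-- ===== Notes on version B (the rewrite author's own statement) =====
-- stated objective: alternative
-- what changed: Replaces repeated front-removal (q = q[1:] per POP) by a single pushed-chars list plus a size counter clamped at 0, returning the suffix of the last `size` pushed chars.
import Mathlib
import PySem

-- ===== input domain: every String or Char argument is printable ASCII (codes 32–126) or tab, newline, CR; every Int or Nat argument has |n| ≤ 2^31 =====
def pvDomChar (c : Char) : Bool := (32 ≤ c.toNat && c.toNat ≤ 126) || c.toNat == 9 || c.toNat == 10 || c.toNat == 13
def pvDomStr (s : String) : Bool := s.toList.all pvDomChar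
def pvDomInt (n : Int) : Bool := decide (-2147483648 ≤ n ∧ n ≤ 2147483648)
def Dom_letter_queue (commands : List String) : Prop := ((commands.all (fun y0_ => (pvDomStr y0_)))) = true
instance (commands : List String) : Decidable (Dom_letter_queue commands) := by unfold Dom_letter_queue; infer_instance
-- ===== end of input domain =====

-- B keeps one list of all pushed chars and a clamped size counter instead of
-- repeatedly slicing the front off a queue; same return value on Pre_.

-- ===== PORT A =====
-- c[-1]; total via default, exact on Pre_ (non-"POP" commands nonempty)
def pvLastCh (c : String) : Char := (PySem.Str.pyGet? c (-1)).getD ' '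

-- loop body of A; q[1:] on a list is exactly List.drop 1
def pvStepA (q : List Char) (c : String) : List Char :=
  if c == "POP" then q.drop 1 else q ++ [pvLastCh c]

def letter_queue (commands : List String) : String :=
  String.ofList (commands.foldl pvStepA [])

-- ===== PORT B =====
-- loop body of B; Python's max(size-1, 0) on a nonneg int is Nat subtraction
def pvStepB (st : List Char × Nat) (c : String) : List Char × Nat :=
  if c == "POP" then (st.1, st.2 - 1) else (st.1 ++ [pvLastCh c], st.2 + 1)

-- pushed[len(pushed)-size:] : the index is nonneg (size ≤ len always), so the slice is List.drop
def letter_queue_alt (commands : List String) : String :=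
  let st := commands.foldl pvStepB ([], 0)
  String.ofList (st.1.drop (st.1.length - st.2))

-- ===== PRECONDITION & SPEC =====
-- Pre_ excludes commands containing the empty string, on which Python A (and B) raise IndexError at c[-1].
def Pre_letter_queue (commands : List String) : Prop := ∀ c ∈ commands, c ≠ ""
instance (commands : List String) : Decidable (Pre_letter_queue commands) := by unfold Pre_letter_queue; infer_instance
def pvWitness_letter_queue : List String := ["ab", "POP", "c"]

def Spec_letter_queue (commands : List String) (out : String) : Prop := out = letter_queue_alt commands
instance (commands : List String) (out : String) : Decidable (Spec_letter_queue commands out) := by unfold Spec_letter_queue; infer_instance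

-- ===== CLAIM (what is proved, stated in full; the proofs are below) =====
def Claim_equal_letter_queue : Prop := ∀ (commands : List String), Dom_letter_queue commands → Pre_letter_queue commands → Spec_letter_queue commands (letter_queue commands)

-- ===== LEMMAS AND PROOFS =====

-- Invariant: B's size never exceeds the pushed list's length, and A's current
-- queue is exactly the last `size` pushed chars.
lemma pv_loop_inv (cmds : List String) : ∀ (p : List Char) (s : Nat), s ≤ p.length →
    (cmds.foldl pvStepB (p, s)).2 ≤ (cmds.foldl pvStepB (p, s)).1.length ∧
    cmds.foldl pvStepA (p.drop (p.length - s)) =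
      (cmds.foldl pvStepB (p, s)).1.drop
        ((cmds.foldl pvStepB (p, s)).1.length - (cmds.foldl pvStepB (p, s)).2) := by
  induction cmds with
  | nil => intro p s hs; exact ⟨hs, rfl⟩
  | cons c cmds ih =>
    intro p s hs
    by_cases hc : c = "POP"
    · have hA : pvStepA (p.drop (p.length - s)) c = p.drop (p.length - (s - 1)) := by
        simp only [pvStepA, hc, if_pos, beq_self_eq_true, List.drop_drop]
        rcases Nat.eq_zero_or_pos s with h0 | h1
        · subst h0
          rw [List.drop_eq_nil_of_le (by omega), List.drop_eq_nil_of_le (by omega)]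
        · congr 1; omega
      have hB : pvStepB (p, s) c = (p, s - 1) := by
        simp [pvStepB, hc]
      simp only [List.foldl_cons, hA, hB]
      exact ih p (s - 1) (by omega)
    · have hA : pvStepA (p.drop (p.length - s)) c
          = (p ++ [pvLastCh c]).drop ((p ++ [pvLastCh c]).length - (s + 1)) := by
        have hlen : (p ++ [pvLastCh c]).length - (s + 1) = p.length - s := by
          simp only [List.length_append, List.length_cons, List.length_nil]; omega
        rw [hlen, List.drop_append_of_le_length (by omega)]
        simp [pvStepA, hc]
      have hB : pvStepB (p, s) c = (p ++ [pvLastCh c], s + 1) := by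
        simp [pvStepB, hc]
      simp only [List.foldl_cons, hA, hB]
      exact ih (p ++ [pvLastCh c]) (s + 1) (by simp only [List.length_append, List.length_cons, List.length_nil]; omega)

-- ===== VERDICT (by name: the statement is the Claim_ definition above) =====
theorem letter_queue_spec : Claim_equal_letter_queue := by
  intro commands _ _
  unfold Spec_letter_queue letter_queue letter_queue_alt
  have h := (pv_loop_inv commands [] 0 (by simp)).2
  simpa using congrArg String.ofList h
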